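-- pv_equiv track=rewrite | github.com/shhuan1989/algorithms | py/topcoder/simple/GreatFairyWar.py | minHP
-- ===== SOURCE A (Python) =====
-- def minHP(dps, hp):
--     if not dps or not hp:
--         return 0
--
--     attack = sum(dps)
--     res = 0
--     enemies = len(dps)
--     for i, h in enumerate(hp):
--         res += h * attack
--         attack -= dps[i]
--         enemies -= 1
--     return res
-- ===== SOURCE B (Python) =====
-- def minHP(dps, hp):
--     if not dps or not hp:
--         return 0
--     suffix = [0] * len(dps)
--     acc = 0
--     for j in range(len(dps) - 1, -1, -1):
--         acc += dps[j]
--         suffix[j] = acc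
--     res = 0
--     for i in range(len(hp)):
--         res += hp[i] * suffix[i]
--     return res
-- ===== Notes on version B (the rewrite author's own statement) =====
-- stated objective: alternative
-- what changed: Replaces A's single pass that carries a running attack decremented by dps[i] with two separate passes: first materialize a suffix-sum table of dps (built back-to-front), then accumulate hp[i] * suffix[i]; no running subtraction remains.
import Mathlib
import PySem

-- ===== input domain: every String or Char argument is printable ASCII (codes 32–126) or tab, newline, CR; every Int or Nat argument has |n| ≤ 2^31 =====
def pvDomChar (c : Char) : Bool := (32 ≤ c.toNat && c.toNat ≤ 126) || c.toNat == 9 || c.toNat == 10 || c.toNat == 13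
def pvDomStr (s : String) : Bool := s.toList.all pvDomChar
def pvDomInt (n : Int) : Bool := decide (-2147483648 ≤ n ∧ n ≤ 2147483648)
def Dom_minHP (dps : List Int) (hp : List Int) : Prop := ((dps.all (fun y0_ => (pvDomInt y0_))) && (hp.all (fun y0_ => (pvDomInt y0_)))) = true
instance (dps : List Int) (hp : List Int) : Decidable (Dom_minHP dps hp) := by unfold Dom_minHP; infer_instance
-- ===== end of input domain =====

-- B rebuilds the result from an explicit suffix-sum table of dps (two passes) instead of
-- A's single pass with a running attack value; same O(n) cost, different decomposition.

-- ===== PORT A =====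
-- A's loop `for i, h in enumerate(hp)` with state (attack, res, enemies); dps[i] read by index
-- (valid under Pre_, which excludes the IndexError case len(hp) > len(dps)).
def minHP_loopA (dps : List Int) : Nat → Int → Int → Int → List Int → Int
  | _, _, res, _, [] => res
  | i, attack, res, enemies, h :: rest =>
      minHP_loopA dps (i + 1) (attack - dps.getD i 0) (res + h * attack) (enemies - 1) rest

def minHP (dps : List Int) (hp : List Int) : Int :=
  if dps = [] ∨ hp = [] then 0
  else minHP_loopA dps 0 dps.sum 0 dps.length hp

-- ===== PORT B =====
-- Source B's backwards loop `acc += dps[j]; suffix[j] = acc` as a foldr carrying (acc, table).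
def suffixTable (dps : List Int) : List Int :=
  (dps.foldr (fun d (p : Int × List Int) => (p.1 + d, (p.1 + d) :: p.2)) (0, [])).2

def minHP_alt (dps : List Int) (hp : List Int) : Int :=
  if dps = [] ∨ hp = [] then 0
  else
    let suffix := suffixTable dps
    (List.range hp.length).foldl (fun res i => res + hp.getD i 0 * suffix.getD i 0) 0

-- ===== PRECONDITION & SPEC =====
-- Pre_ excludes exactly the inputs where A raises IndexError (both nonempty and hp longer than dps);
-- B raises there as well.
def Pre_minHP (dps : List Int) (hp : List Int) : Prop :=
  dps = [] ∨ hp = [] ∨ hp.length ≤ dps.length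
instance (dps : List Int) (hp : List Int) : Decidable (Pre_minHP dps hp) := by
  unfold Pre_minHP; infer_instance

def pvWitness_minHP : List Int × List Int := ([3, 1, 2], [5, 4])

def Spec_minHP (dps : List Int) (hp : List Int) (out : Int) : Prop := out = minHP_alt dps hp
instance (dps : List Int) (hp : List Int) (out : Int) : Decidable (Spec_minHP dps hp out) := by unfold Spec_minHP; infer_instance

-- ===== CLAIM (what is proved, stated in full; the proofs are below) =====
def Claim_equal_minHP : Prop := ∀ (dps : List Int) (hp : List Int), Dom_minHP dps hp → Pre_minHP dps hp → Spec_minHP dps hp (minHP dps hp)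

-- ===== LEMMAS AND PROOFS =====

-- common value: Z hp s = Σ hp[k] * s[k] (zipWith-product sum, truncating)
def Zsum : List Int → List Int → Int
  | [], _ => 0
  | _ :: t, [] => Zsum t []
  | h :: t, x :: s => h * x + Zsum t s

theorem suffixTable_fst (dps : List Int) :
    (dps.foldr (fun d (p : Int × List Int) => (p.1 + d, (p.1 + d) :: p.2)) (0, [])).1 = dps.sum := by
  induction dps with
  | nil => simp
  | cons d t ih => simp [List.foldr, ih]; ring

theorem suffixTable_cons (d : Int) (t : List Int) :
    suffixTable (d :: t) = (t.sum + d) :: suffixTable t := by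
  simp [suffixTable, List.foldr, suffixTable_fst]

-- B's indexed range-fold equals the zip-product sum
theorem rangeFold_eq_Zsum (hp s : List Int) (res : Int) :
    (List.range hp.length).foldl (fun r i => r + hp.getD i 0 * s.getD i 0) res
      = res + Zsum hp s := by
  induction hp generalizing s res with
  | nil => simp [Zsum]
  | cons h t ih =>
    rw [List.length_cons, List.range_succ_eq_map, List.foldl_cons, List.foldl_map]
    cases s with
    | nil =>
      simpa [Zsum] using ih [] (res + h * 0)
    | cons x s' =>
      have := ih s' (res + h * x)
      simp only [List.getD_cons_succ, List.getD_cons_zero] at *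
      rw [this, Zsum]; ring

-- A's loop, started at index i with attack = sum of the suffix, computes the zip-product sum
-- against the suffix table of that suffix.
theorem loopA_eq (hp : List Int) : ∀ (dps : List Int) (i : Nat) (res e : Int),
    i + hp.length ≤ dps.length →
    minHP_loopA dps i (dps.drop i).sum res e hp = res + Zsum hp (suffixTable (dps.drop i)) := by
  induction hp with
  | nil => intro dps i res e _; simp [minHP_loopA, Zsum]
  | cons h t ih =>
    intro dps i res e hle
    have hi : i < dps.length := by simp at hle; omega
    have hdrop : dps.drop i = dps[i] :: dps.drop (i + 1) := List.drop_eq_getElem_cons hi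
    have hget : dps.getD i 0 = dps[i] := List.getD_eq_getElem dps 0 hi
    rw [minHP_loopA]
    have hsum : (dps.drop i).sum - dps.getD i 0 = (dps.drop (i + 1)).sum := by
      rw [hdrop, List.sum_cons, hget]; ring
    rw [hsum]
    have := ih dps (i + 1) (res + h * (dps.drop i).sum) (e - 1) (by simp at hle ⊢; omega)
    rw [this, hdrop, suffixTable_cons, Zsum]
    simp only [List.sum_cons]; ring

-- ===== VERDICT (by name: the statement is the Claim_ definition above) =====
theorem minHP_spec : Claim_equal_minHP := by
  intro dps hp _ hpre
  unfold Spec_minHP minHP minHP_alt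
  by_cases hguard : dps = [] ∨ hp = []
  · simp [hguard]
  · simp only [hguard, if_false]
    rw [not_or] at hguard
    have hle : hp.length ≤ dps.length := by
      rcases hpre with h | h | h
      · exact absurd h hguard.1
      · exact absurd h hguard.2
      · exact h
    have := loopA_eq hp dps 0 0 dps.length (by simpa using hle)
    simp only [List.drop_zero] at this
    rw [this, rangeFold_eq_Zsum]
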